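-- pv_equiv track=rewrite | github.com/mjayhhh/PycharmProjects | pythonProject/1차 2급/1차 2급 1_initial_code.py | solution
-- ===== SOURCE A (Python) =====
-- def solution(shirt_size):
--     answer = []
--     for i in range(6):
--         answer.append(0)
--     for i in range(len(shirt_size)):
--         if shirt_size[i] == "XS":
--             answer[0] += 1
--         elif shirt_size[i] == "S":
--             answer[1] += 1
--         elif shirt_size[i] == "M":
--             answer[2] += 1
--         elif shirt_size[i] == "L":
--             answer[3] += 1
--         elif shirt_size[i] == "XL":
--             answer[4] += 1
--         elif shirt_size[i] == "XXL":
--             answer[5] += 1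
--     return answer
-- ===== SOURCE B (Python) =====
-- def solution(shirt_size):
--     return [shirt_size.count(label) for label in ["XS", "S", "M", "L", "XL", "XXL"]]
-- ===== Notes on version B (the rewrite author's own statement) =====
-- stated objective: idiomatic
-- what changed: B drops A's single pass with a preallocated mutable tally and six-way if/elif branching entirely: it makes one dedicated counting pass per label (shirt_size.count) and emits the six counts directly in label order.
import Mathlib
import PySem

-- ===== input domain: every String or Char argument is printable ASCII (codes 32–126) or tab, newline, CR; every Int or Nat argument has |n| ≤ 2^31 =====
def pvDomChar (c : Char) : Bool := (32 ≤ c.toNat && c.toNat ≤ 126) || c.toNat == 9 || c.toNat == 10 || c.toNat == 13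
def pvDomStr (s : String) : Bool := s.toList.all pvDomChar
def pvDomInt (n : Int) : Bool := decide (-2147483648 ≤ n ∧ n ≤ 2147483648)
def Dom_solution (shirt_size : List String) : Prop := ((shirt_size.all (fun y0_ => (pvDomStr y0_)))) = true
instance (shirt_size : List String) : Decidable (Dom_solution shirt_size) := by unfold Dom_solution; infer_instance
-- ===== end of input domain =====

-- B replaces A's single pass with a preallocated mutable tally and six-way if/elif branching
-- by one dedicated counting pass per label (list.count), emitted in label order; idiomatic.


-- ===== PORT A =====
-- answer[j] += 1 : the indices are literal and in range (answer has 6 slots)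
def solutionStep (a : List Int) (s : String) : List Int :=
  if s = "XS" then a.set 0 (a.getD 0 0 + 1)
  else if s = "S" then a.set 1 (a.getD 1 0 + 1)
  else if s = "M" then a.set 2 (a.getD 2 0 + 1)
  else if s = "L" then a.set 3 (a.getD 3 0 + 1)
  else if s = "XL" then a.set 4 (a.getD 4 0 + 1)
  else if s = "XXL" then a.set 5 (a.getD 5 0 + 1)
  else a

def solution (shirt_size : List String) : List Int :=
  let answer : List Int := (PySem.List.pyRange 0 6 1).foldl (fun a _ => a ++ [(0 : Int)]) []
  (PySem.List.pyRange 0 (PySem.List.len shirt_size) 1).foldl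
    (fun a i => solutionStep a (PySem.List.pyGetD shirt_size i "")) answer

-- ===== PORT B =====
def solution_alt (shirt_size : List String) : List Int :=
  ["XS", "S", "M", "L", "XL", "XXL"].map (fun label => (PySem.List.count shirt_size label : Int))

-- ===== PRECONDITION & SPEC =====
def Spec_solution (shirt_size : List String) (out : List Int) : Prop := out = solution_alt shirt_size
instance (shirt_size : List String) (out : List Int) : Decidable (Spec_solution shirt_size out) := by unfold Spec_solution; infer_instance

-- ===== CLAIM (what is proved, stated in full; the proofs are below) =====
def Claim_equal_solution : Prop := ∀ (shirt_size : List String), Dom_solution shirt_size → Spec_solution shirt_size (solution shirt_size)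

-- ===== LEMMAS AND PROOFS =====
theorem foldl_solutionStep (s : List String) (a b c d e f : Int) :
    s.foldl solutionStep [a, b, c, d, e, f] =
      [a + s.count "XS", b + s.count "S", c + s.count "M",
       d + s.count "L", e + s.count "XL", f + s.count "XXL"] := by
  induction s generalizing a b c d e f with
  | nil => simp
  | cons x t ih =>
    simp only [List.foldl_cons, solutionStep]
    split_ifs with h1 h2 h3 h4 h5 h6
    · subst h1; simp [List.set, List.getD, ih]; ring
    · subst h2; simp [List.set, List.getD, ih]; ring
    · subst h3; simp [List.set, List.getD, ih]; ring
    · subst h4; simp [List.set, List.getD, ih]; ring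
    · subst h5; simp [List.set, List.getD, ih]; ring
    · subst h6; simp [List.set, List.getD, ih]; ring
    · simp [ih, h1, h2, h3, h4, h5, h6]

theorem solution_eq_counts (s : List String) :
    solution s = [(s.count "XS" : Int), s.count "S", s.count "M",
                  s.count "L", s.count "XL", s.count "XXL"] := by
  unfold solution
  rw [PySem.List.foldl_pyRange_zero_pyGetD s "" solutionStep]
  have h0 : (PySem.List.pyRange 0 6 1).foldl (fun a _ => a ++ [(0 : Int)]) [] =
      [0, 0, 0, 0, 0, 0] := by decide
  rw [h0, foldl_solutionStep]
  simp

-- ===== VERDICT (by name: the statement is the Claim_ definition above) =====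
theorem solution_spec : Claim_equal_solution := by
  intro s _
  show solution s = solution_alt s
  rw [solution_eq_counts]
  simp [solution_alt, PySem.List.count_eq]
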